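-- pv_equiv track=rewrite | github.com/Tameemahmedd/python_training | day1/p5.py | smallest_digit1
-- ===== SOURCE A (Python) =====
-- def smallest_digit1(n):
--
-- #    digits=[int(digit)for digit in str(n)]
-- #    digits.sort()
-- #    return digits[1]
--     smallest_digit=9
--     second_smallest_digit=9
--     temp=n
--     while temp!=0:
--         rem=temp%10
--         temp=temp//10
--         if rem<smallest_digit:
--             second_smallest_digit=smallest_digit
--             smallest_digit=rem
--         elif rem<second_smallest_digit:
--             second_smallest_digit=rem
--     return second_smallest_digit
-- ===== SOURCE B (Python) =====
-- def smallest_digit1(n):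
--     digits = sorted(int(c) for c in str(n))
--     return digits[1] if len(digits) >= 2 else 9
-- ===== Notes on version B (the rewrite author's own statement) =====
-- stated objective: simpler
-- what changed: Replaces the while-loop tracking two running minima by digit extraction with mod/floordiv with sorting the digits of str(n) and indexing the second element (9 when there are fewer than two digits).
import Mathlib
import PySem

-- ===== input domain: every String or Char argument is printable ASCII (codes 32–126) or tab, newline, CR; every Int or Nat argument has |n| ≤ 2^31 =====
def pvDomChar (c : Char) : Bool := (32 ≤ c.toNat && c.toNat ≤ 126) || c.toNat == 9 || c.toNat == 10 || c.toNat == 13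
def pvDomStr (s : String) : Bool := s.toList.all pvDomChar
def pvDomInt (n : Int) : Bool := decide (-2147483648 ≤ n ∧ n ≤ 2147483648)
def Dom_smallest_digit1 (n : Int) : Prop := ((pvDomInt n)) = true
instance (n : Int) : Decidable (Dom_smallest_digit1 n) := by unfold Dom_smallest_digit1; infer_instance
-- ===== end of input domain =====

-- B replaces A's two-running-minima while-loop by sorting the digits of str(n) and
-- taking the second element (9 when there are fewer than two digits): simpler.

-- ===== PORT A =====
-- A's while loop: state (smallest_digit, second_smallest_digit); the fuel argument only
-- makes the recursion total (n.natAbs + 1 steps always suffice when n ≥ 0; Python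
-- loops forever on n < 0, which Pre_ excludes).
def pvLoopA : Nat → Int → Int → Int → Int × Int
  | 0, _, s, ss => (s, ss)
  | fuel+1, temp, s, ss =>
    if temp = 0 then (s, ss)
    else
      let rem := PySem.Int.mod temp 10
      let temp' := PySem.Int.floordiv temp 10
      if rem < s then pvLoopA fuel temp' rem s
      else if rem < ss then pvLoopA fuel temp' s rem
      else pvLoopA fuel temp' s ss

def smallest_digit1 (n : Int) : Int :=
  (pvLoopA (n.natAbs + 1) n 9 9).2

-- ===== PORT B =====
-- Source B: digits = sorted(int(c) for c in str(n)); return digits[1] if len(digits) >= 2 else 9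
-- int(c) on a single decimal-digit char is ported as its code minus 48 (exact on the
-- characters of str(n) for n ≥ 0; for n < 0 Python's int('-') raises, outside Pre_).
def smallest_digit1_alt (n : Int) : Int :=
  let digits := PySem.List.sorted ((PySem.Int.toStr n).toList.map
      (fun c => ((c.toNat : Int) - 48))) (fun x => x)
  if 2 ≤ digits.length then digits[1]! else 9

-- ===== PRECONDITION & SPEC =====
-- Pre_ excludes n < 0, on which A's while loop never terminates (temp // 10 stalls at -1).
def Pre_smallest_digit1 (n : Int) : Prop := 0 ≤ n
instance (n : Int) : Decidable (Pre_smallest_digit1 n) := by unfold Pre_smallest_digit1; infer_instance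
def pvWitness_smallest_digit1 : Int := 10

def Spec_smallest_digit1 (n : Int) (out : Int) : Prop := out = smallest_digit1_alt n
instance (n : Int) (out : Int) : Decidable (Spec_smallest_digit1 n out) := by unfold Spec_smallest_digit1; infer_instance

-- ===== CLAIM (what is proved, stated in full; the proofs are below) =====
def Claim_equal_smallest_digit1 : Prop := ∀ (n : Int), Dom_smallest_digit1 n → Pre_smallest_digit1 n → Spec_smallest_digit1 n (smallest_digit1 n)

-- ===== LEMMAS AND PROOFS =====

-- A's loop-body update on the state pair
def pvStep (p : Int × Int) (x : Int) : Int × Int :=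
  if x < p.1 then (x, p.1) else if x < p.2 then (p.1, x) else p

-- the insertion used by PySem.List.sorted with the identity key
def pvIns : Int → List Int → List Int :=
  PySem.List.insertBy (fun a b => decide (a < b))

-- A's loop is the fold of pvStep over the little-endian digit list
theorem pvLoopA_eq_foldl (fuel : Nat) :
    ∀ (t : Int) (s ss : Int), 0 ≤ t → t.toNat < fuel →
      pvLoopA fuel t s ss =
        List.foldl pvStep (s, ss) ((Nat.digits 10 t.toNat).map (fun (d : Nat) => (d : Int))) := by
  induction fuel with
  | zero => intro t s ss h1 h2; omega
  | succ fuel ih =>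
    intro t s ss h1 h2
    rw [pvLoopA]
    by_cases ht : t = 0
    · subst ht; simp
    · rw [if_neg ht]
      have htpos : 0 < t := lt_of_le_of_ne h1 (Ne.symm ht)
      have hrem : PySem.Int.mod t 10 = ((t.toNat % 10 : Nat) : Int) := by
        rw [PySem.Int.mod_eq_emod_of_pos (by omega)]; omega
      have hdiv : PySem.Int.floordiv t 10 = ((t.toNat / 10 : Nat) : Int) := by
        rw [PySem.Int.floordiv_eq_ediv_of_pos (by omega)]; omega
      have hnat : 0 < t.toNat := by omega
      rw [Nat.digits_def' (b := 10) (by omega) hnat]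
      simp only [List.map_cons, List.foldl_cons]
      have hih := ih ((t.toNat / 10 : Nat) : Int) ; clear ih
      have hlt : (((t.toNat / 10 : Nat) : Int)).toNat < fuel := by simp; omega
      have hnn : (0:Int) ≤ ((t.toNat / 10 : Nat) : Int) := by positivity
      simp only [hrem, hdiv]
      split_ifs with hA hB
      · have hstep : pvStep (s, ss) ((t.toNat % 10 : Nat) : Int) = (((t.toNat % 10 : Nat) : Int), s) := by
          unfold pvStep; rw [if_pos hA]
        rw [hstep]
        have h3 := hih ((t.toNat % 10 : Nat) : Int) s hnn hlt
        rw [Int.toNat_natCast] at h3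
        exact h3
      · have hstep : pvStep (s, ss) ((t.toNat % 10 : Nat) : Int) = (s, ((t.toNat % 10 : Nat) : Int)) := by
          unfold pvStep; rw [if_neg hA, if_pos hB]
        rw [hstep]
        have h3 := hih s ((t.toNat % 10 : Nat) : Int) hnn hlt
        rw [Int.toNat_natCast] at h3
        exact h3
      · have hstep : pvStep (s, ss) ((t.toNat % 10 : Nat) : Int) = (s, ss) := by
          unfold pvStep; rw [if_neg hA, if_neg hB]
        rw [hstep]
        have h3 := hih s ss hnn hlt
        rw [Int.toNat_natCast] at h3
        exact h3

-- the first two elements of an insertion depend only on the first two of the target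
theorem pvTake2_ins (x : Int) (ys : List Int) :
    List.take 2 (pvIns x ys) = List.take 2 (pvIns x (List.take 2 ys)) := by
  match ys with
  | [] => rfl
  | [a] => rfl
  | a :: c :: r =>
    simp only [pvIns, PySem.List.insertBy, List.take]
    split_ifs <;> simp [*]

-- pushing take 2 through the insertion fold
theorem pvTake2_foldl (L : List Int) :
    ∀ ys, List.take 2 (List.foldl (fun acc x => pvIns x acc) ys L)
      = List.foldl (fun acc x => List.take 2 (pvIns x acc)) (List.take 2 ys) L := by
  induction L with
  | nil => intro ys; simp
  | cons x L ih =>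
    intro ys
    simp only [List.foldl_cons]
    rw [ih, pvTake2_ins]

-- the pair fold is the 2-truncated insertion fold
theorem pvPair_fold (L : List Int) :
    ∀ s ss, (fun p : Int × Int => [p.1, p.2]) (List.foldl pvStep (s, ss) L)
      = List.foldl (fun acc x => List.take 2 (pvIns x acc)) [s, ss] L := by
  induction L with
  | nil => intro s ss; rfl
  | cons x L ih =>
    intro s ss
    simp only [List.foldl_cons]
    have h : List.take 2 (pvIns x [s, ss]) = [(pvStep (s,ss) x).1, (pvStep (s,ss) x).2] := by
      simp only [pvIns, PySem.List.insertBy, pvStep]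
      split_ifs <;> simp_all
    rw [h]
    have := ih (pvStep (s,ss) x).1 (pvStep (s,ss) x).2
    simpa using this

theorem pvDigitChar_toNat (d : Nat) (h : d < 10) : (Nat.digitChar d).toNat = 48 + d := by
  interval_cases d <;> rfl

theorem pvToDigitsCore (f : Nat) :
    ∀ (n : Nat) (acc : List Char), 0 < n → n ≤ f →
      Nat.toDigitsCore 10 f n acc = ((Nat.digits 10 n).map Nat.digitChar).reverse ++ acc := by
  induction f with
  | zero => intro n acc h1 h2; omega
  | succ f ih =>
    intro n acc h1 h2
    rw [show Nat.toDigitsCore 10 (f+1) n acc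
        = if n / 10 = 0 then (n % 10).digitChar :: acc
          else Nat.toDigitsCore 10 f (n/10) ((n % 10).digitChar :: acc) from rfl]
    rw [Nat.digits_def' (b := 10) (by omega) h1]
    by_cases hz : n / 10 = 0
    · rw [if_pos hz, hz, Nat.digits_zero]
      simp
    · rw [if_neg hz]
      rw [ih (n / 10) _ (by omega) (by omega)]
      simp

-- B's raw digit list is the reversed little-endian digit list (n > 0)
theorem pvDigitsB (n : Int) (h : 0 < n) :
    (PySem.Int.toStr n).toList.map (fun c => ((c.toNat : Int) - 48))
      = ((Nat.digits 10 n.toNat).map (fun (d : Nat) => (d : Int))).reverse := by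
  rw [PySem.Int.toList_toStr]
  have hneg : ¬ n < 0 := by omega
  rw [show PySem.Int.toChars n = Nat.toDigits 10 n.toNat from by
    simp [PySem.Int.toChars, hneg]]
  rw [Nat.toDigits, pvToDigitsCore (n.toNat + 1) n.toNat [] (by omega) (by omega)]
  rw [List.append_nil, List.map_reverse, List.map_map]
  congr 1
  apply List.map_congr_left
  intro d hd
  have hlt : d < 10 := Nat.digits_lt_base (by omega) hd
  simp only [Function.comp_apply, pvDigitChar_toNat d hlt]
  push_cast
  ring

-- ===== VERDICT (by name: the statement is the Claim_ definition above) =====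
theorem smallest_digit1_spec : Claim_equal_smallest_digit1 := by
  intro n _ hpre
  unfold Spec_smallest_digit1
  have hpre' : (0:Int) ≤ n := hpre
  by_cases h0 : n = 0
  · subst h0; decide
  · have hpos : 0 < n := lt_of_le_of_ne hpre' (Ne.symm h0)
    set L : List Int := (Nat.digits 10 n.toNat).map (fun (d : Nat) => (d : Int)) with hL
    -- A's value as a fold over L
    have hA : smallest_digit1 n = (List.foldl pvStep (9, 9) L).2 := by
      unfold smallest_digit1
      rw [pvLoopA_eq_foldl (n.natAbs + 1) n 9 9 hpre' (by omega)]
    -- the pair fold as the 2-truncated insertion fold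
    have hpair := pvPair_fold L 9 9
    have hsnd : (List.foldl pvStep (9, 9) L).2
        = (List.foldl (fun acc x => List.take 2 (pvIns x acc)) [9, 9] L)[1]! := by
      rw [← hpair]; simp
    -- the truncated fold is take 2 of sorted ([9,9] ++ L)
    have hfold : List.foldl (fun acc x => List.take 2 (pvIns x acc)) [9, 9] L
        = List.take 2 (PySem.List.sorted ((9:Int) :: 9 :: L) (fun x => x)) := by
      have h2 := pvTake2_foldl L [9, 9]
      norm_num at h2
      rw [PySem.List.sorted_eq_foldl_insertBy]
      rw [show ((9:Int) :: 9 :: L) = [9, 9] ++ L from rfl, List.foldl_append]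
      rw [← h2]
      rfl
    -- reorder: sorted ([9,9] ++ L) = sorted (L ++ [9,9])
    have hperm : PySem.List.sorted ((9:Int) :: 9 :: L) (fun x => x)
        = PySem.List.sorted (L ++ [9, 9]) (fun x => x) :=
      PySem.List.sorted_eq_sorted_of_perm _ _ _ (fun a b hab => hab)
        (by simpa using List.perm_append_comm (l₁ := [(9:Int), 9]) (l₂ := L))
    -- every element of L is a digit < 10
    have hle9 : ∀ y ∈ PySem.List.sorted L (fun x : Int => x) false, decide ((9:Int) < y) = false := by
      intro y hy
      rw [PySem.List.mem_sorted] at hy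
      obtain ⟨d, hd, rfl⟩ := List.mem_map.mp hy
      have := Nat.digits_lt_base (by omega) hd
      simp; omega
    -- the two 9s sort to the end
    have htail : PySem.List.sorted (L ++ [9, 9]) (fun x => x)
        = PySem.List.sorted L (fun x => x) ++ [9, 9] := by
      rw [PySem.List.sorted_eq_foldl_insertBy, List.foldl_append,
          ← PySem.List.sorted_eq_foldl_insertBy]
      simp only [List.foldl_cons, List.foldl_nil]
      rw [PySem.List.insertBy_of_forall_not_before _ 9 (PySem.List.sorted L (fun x => x))
            (by intro y hy; simpa using hle9 y hy)]
      rw [PySem.List.insertBy_of_forall_not_before _ 9 (PySem.List.sorted L (fun x => x) ++ [9])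
            (by
              intro y hy
              rcases List.mem_append.mp hy with h | h
              · simpa using hle9 y h
              · simp at h; subst h; simp)]
      simp
    -- B's sorted digit list is sorted L
    have hB : smallest_digit1_alt n
        = (if 2 ≤ (PySem.List.sorted L (fun x => x)).length
           then (PySem.List.sorted L (fun x => x))[1]! else 9) := by
      unfold smallest_digit1_alt
      rw [pvDigitsB n hpos, ← hL]
      rw [PySem.List.sorted_eq_sorted_of_perm L.reverse L _ (fun a b hab => hab) L.reverse_perm]
    rw [hA, hsnd, hfold, hperm, htail, hB]
    -- compare take-2-indexing with the guarded second element
    rcases hS : PySem.List.sorted L (fun x : Int => x) with _ | ⟨a, _ | ⟨b, r⟩⟩ <;> simp
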